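-- pv_equiv track=rewrite | github.com/soulgchoi/Algorithm | SWEA/190911/연습문제3.py | Bbit_input
-- ===== SOURCE A (Python) =====
-- def Bbit_input(i):
--     output = ''
--     for j in range(3, -1, -1):
--         if i & (1 << j):
--             output += '1'
--         else:
--             output += '0'
--     return output
-- ===== SOURCE B (Python) =====
-- def Bbit_input(i):
--     return format(i & 15, '04b')
-- ===== Notes on version B (the rewrite author's own statement) =====
-- stated objective: idiomatic
-- what changed: Replaces the 4-iteration MSB-first bit-testing loop with string concatenation by a single closed-form formatting call on the masked low nibble: format(i & 15, '04b').
import Mathlib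
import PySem

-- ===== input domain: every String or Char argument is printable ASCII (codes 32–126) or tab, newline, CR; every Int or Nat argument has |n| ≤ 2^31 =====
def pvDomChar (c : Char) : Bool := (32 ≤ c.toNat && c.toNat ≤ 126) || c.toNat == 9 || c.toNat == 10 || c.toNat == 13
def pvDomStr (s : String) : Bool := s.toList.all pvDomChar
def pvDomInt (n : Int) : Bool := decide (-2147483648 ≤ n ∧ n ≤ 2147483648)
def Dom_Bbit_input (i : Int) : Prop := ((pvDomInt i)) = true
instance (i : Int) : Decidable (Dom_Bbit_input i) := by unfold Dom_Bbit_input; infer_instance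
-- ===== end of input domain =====

-- B replaces A's 4-iteration MSB-first bit-testing loop by one formatting call on the masked nibble: format(i & 15, '04b') (idiomatic, same cost).


-- ===== PORT A =====
-- for j in range(3, -1, -1): output += '1' if i & (1 << j) else '0'
def Bbit_input (i : Int) : String :=
  (PySem.List.pyRange 3 (-1) (-1)).foldl
    (fun output j =>
      if PySem.Int.band i ((1 : Int) <<< j.toNat) ≠ 0 then output ++ "1" else output ++ "0")
    ""

-- ===== PORT B =====
-- format(i & 15, '04b'): toBin is format(_, 'b'); the '04' zero-pad is ported by hand
-- (exact here: i & 15 is in [0, 16), so toBin yields 1–4 binary digits, no sign).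
def Bbit_input_alt (i : Int) : String :=
  let s := PySem.Int.toBin (PySem.Int.band i 15)
  String.ofList (List.replicate (4 - s.toList.length) '0' ++ s.toList)

-- ===== PRECONDITION & SPEC =====
def Spec_Bbit_input (i : Int) (out : String) : Prop := out = Bbit_input_alt i
instance (i : Int) (out : String) : Decidable (Spec_Bbit_input i out) := by unfold Spec_Bbit_input; infer_instance

-- ===== CLAIM (what is proved, stated in full; the proofs are below) =====
def Claim_equal_Bbit_input : Prop := ∀ (i : Int), Dom_Bbit_input i → Spec_Bbit_input i (Bbit_input i)

-- ===== LEMMAS AND PROOFS =====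

theorem nat_mask15 (n : Nat) : n &&& 15 = n % 16 := by
  have := Nat.and_two_pow_sub_one_eq_mod n 4
  norm_num at this; omega

-- i & 15 = i mod 16 (Python semantics of & with the low-nibble mask)
theorem band15_eq_emod (i : Int) : PySem.Int.band i 15 = i.emod 16 := by
  unfold PySem.Int.band
  split_ifs with h h15 h15
  · rw [show Int.toNat 15 = 15 from rfl, nat_mask15, show i.emod 16 = i % 16 from rfl]; omega
  · norm_num at h15
  · rw [show Int.toNat 15 = 15 from rfl, Nat.and_comm, nat_mask15,
      show i.emod 16 = i % 16 from rfl]; omega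
  · norm_num at h15

-- ∀ r < 16, j < 4 : bit j of (15 - r) is the complement of bit j of r
theorem bit_complement : ∀ r ∈ Finset.range 16, ∀ j ∈ Finset.range 4,
    (15 - r).testBit j = !(r.testBit j) := by decide

theorem nat_and_pow_mod (n j : Nat) (hj : j < 4) : (n % 16) &&& 2 ^ j = n &&& 2 ^ j := by
  rw [Nat.and_two_pow, Nat.and_two_pow,
    show (16 : Nat) = 2 ^ 4 from rfl, Nat.testBit_mod_two_pow]
  simp [hj]

theorem nat_neg_bit (m j : Nat) (hj : j < 4) :
    2 ^ j - (2 ^ j &&& m) = (15 - m % 16) &&& 2 ^ j := by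
  have hb : (15 - m % 16).testBit j = !(m.testBit j) := by
    have h1 : (15 - m % 16).testBit j = !((m % 16).testBit j) :=
      bit_complement (m % 16) (by simp [Nat.mod_lt]) j (by simp [hj])
    rw [h1, show (16 : Nat) = 2 ^ 4 from rfl, Nat.testBit_mod_two_pow]
    simp [hj]
  rw [Nat.and_comm (2 ^ j) m, Nat.and_two_pow, Nat.and_two_pow, hb]
  cases m.testBit j <;> simp

-- for the four loop bits, i & 2^j only depends on i mod 16
theorem band_pow_emod (i : Int) (j : Nat) (hj : j < 4) :
    PySem.Int.band i ((2 : Int) ^ j) = PySem.Int.band (i.emod 16) ((2 : Int) ^ j) := by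
  have he0 : 0 ≤ i.emod 16 := Int.emod_nonneg i (by norm_num)
  have h2j : (0 : Int) ≤ 2 ^ j := by positivity
  have htn : ((2 : Int) ^ j).toNat = 2 ^ j := by
    interval_cases j <;> decide
  unfold PySem.Int.band
  simp only [h2j, he0, if_pos]
  by_cases h : 0 ≤ i
  · rw [if_pos h]
    have hm : (i.emod 16).toNat = i.toNat % 16 := by
      rw [show i.emod 16 = i % 16 from rfl]; omega
    rw [hm, htn, nat_and_pow_mod _ j hj]
  · rw [if_neg h]
    have hm : (i.emod 16).toNat = 15 - ((-i - 1).toNat % 16) := by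
      rw [show i.emod 16 = i % 16 from rfl]; omega
    rw [hm, htn, nat_neg_bit _ j hj]

-- ===== VERDICT (by name: the statement is the Claim_ definition above) =====
theorem Bbit_input_spec : Claim_equal_Bbit_input := by
  intro i _
  unfold Spec_Bbit_input Bbit_input Bbit_input_alt
  have h8 := band_pow_emod i 3 (by norm_num)
  have h4 := band_pow_emod i 2 (by norm_num)
  have h2 := band_pow_emod i 1 (by norm_num)
  have h1 := band_pow_emod i 0 (by norm_num)
  norm_num at h8 h4 h2 h1
  rw [show PySem.List.pyRange 3 (-1) (-1) = [3, 2, 1, 0] from by decide]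
  simp only [List.foldl, band15_eq_emod,
    show ((1 : Int) <<< (((3 : Int).toNat : Nat) : Int)) = 8 from by decide,
    show ((1 : Int) <<< (((2 : Int).toNat : Nat) : Int)) = 4 from by decide,
    show ((1 : Int) <<< (((1 : Int).toNat : Nat) : Int)) = 2 from by decide,
    show ((1 : Int) <<< (((0 : Int).toNat : Nat) : Int)) = 1 from by decide,
    h8, h4, h2, h1]
  have he0 : 0 ≤ i.emod 16 := Int.emod_nonneg i (by norm_num)
  have he1 : i.emod 16 < 16 := Int.emod_lt_of_pos i (by norm_num)
  set r := i.emod 16 with hr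
  clear_value r
  interval_cases r <;> decide
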